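-- pv_equiv track=rewrite | github.com/Larsg7/theo_neuro_1 | sheet2/crosscorrelation.py | cross_correlation
-- ===== SOURCE A (Python) =====
-- def cross_correlation(taus, train1, train2, time_step):
--     result = list(range(len(taus)))
--     num_elements = len(train1)
--     for index in range(len(taus)):
--         displacement_index = int(taus[index] / time_step)
--         result[index] = sum([train1[i] * train2[i + displacement_index] for i in range(num_elements)
--                              if 0 < i + displacement_index < num_elements])
--     return result
-- ===== SOURCE B (Python) =====
-- def cross_correlation(taus, train1, train2, time_step):
--     n = len(train1)
--     ds = [int(t / time_step) for t in taus]
--     table = {}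
--     for d in ds:
--         if d not in table:
--             s = 0
--             for i in range(max(0, 1 - d), min(n, n - d)):
--                 s += train1[i] * train2[i + d]
--             table[d] = s
--     return [table[d] for d in ds]
-- ===== Notes on version B (the rewrite author's own statement) =====
-- stated objective: faster
-- what changed: Instead of re-scanning all n indices with a per-element bounds filter for every tau, B computes each displacement's sum once over exactly the valid index window (a dict keyed by displacement) and answers each tau by lookup.
import Mathlib
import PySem

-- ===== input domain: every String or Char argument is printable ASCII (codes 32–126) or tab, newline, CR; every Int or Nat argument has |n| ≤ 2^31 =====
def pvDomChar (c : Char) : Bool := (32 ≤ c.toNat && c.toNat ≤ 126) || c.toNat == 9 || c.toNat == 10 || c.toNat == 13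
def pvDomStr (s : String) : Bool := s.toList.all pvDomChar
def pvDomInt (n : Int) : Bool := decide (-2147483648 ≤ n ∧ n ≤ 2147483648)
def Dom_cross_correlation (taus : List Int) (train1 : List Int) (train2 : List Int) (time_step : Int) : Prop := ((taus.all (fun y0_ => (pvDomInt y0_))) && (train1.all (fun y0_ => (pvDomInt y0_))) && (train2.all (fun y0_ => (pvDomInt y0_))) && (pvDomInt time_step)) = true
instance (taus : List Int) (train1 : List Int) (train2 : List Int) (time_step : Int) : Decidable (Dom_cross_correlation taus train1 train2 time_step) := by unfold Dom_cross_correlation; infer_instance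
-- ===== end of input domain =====

-- B replaces A's per-tau full scan with a bounds-filter by a dict of per-displacement
-- sums, each computed once over exactly the valid index window, then a lookup pass (faster).


-- ===== PORT A =====
def cross_correlation (taus : List Int) (train1 : List Int) (train2 : List Int) (time_step : Int) : List Int :=
  let result := PySem.List.pyRange 0 (taus.length : Int) 1
  let num_elements : Int := (train1.length : Int)
  (PySem.List.pyRange 0 (taus.length : Int) 1).foldl
    (fun result index =>
      let displacement_index := PySem.Int.truncdiv (PySem.List.pyGetD taus index 0) time_step
      result.set index.toNat
        ((PySem.List.pyRange 0 num_elements 1).foldl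
          (fun acc i =>
            if 0 < i + displacement_index ∧ i + displacement_index < num_elements then
              acc + PySem.List.pyGetD train1 i 0 * PySem.List.pyGetD train2 (i + displacement_index) 0
            else acc) 0))
    result

-- ===== PORT B =====
def ccAltWindowSum (train1 : List Int) (train2 : List Int) (d : Int) : Int :=
  let n : Int := (train1.length : Int)
  (PySem.List.pyRange (max 0 (1 - d)) (min n (n - d)) 1).foldl
    (fun s i => s + PySem.List.pyGetD train1 i 0 * PySem.List.pyGetD train2 (i + d) 0) 0

def cross_correlation_alt (taus : List Int) (train1 : List Int) (train2 : List Int) (time_step : Int) : List Int :=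
  let ds := taus.map (fun t => PySem.Int.truncdiv t time_step)
  let table := ds.foldl
    (fun (table : PySem.Dict Int Int) d =>
      match table.get? d with
      | some _ => table
      | none => table.insert d (ccAltWindowSum train1 train2 d))
    PySem.Dict.empty
  ds.map (fun d => (table.get? d).getD 0)

-- ===== PRECONDITION & SPEC =====
-- Pre_ excludes exactly the inputs where Python A raises: ZeroDivisionError when
-- time_step = 0, and IndexError when some accessed index i + d (0 < i + d < len(train1))
-- falls beyond the end of train2.
def Pre_cross_correlation (taus : List Int) (train1 : List Int) (train2 : List Int) (time_step : Int) : Prop :=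
  (taus ≠ [] → time_step ≠ 0) ∧
    ∀ t ∈ taus, ∀ i ∈ PySem.List.pyRange 0 (train1.length : Int) 1,
      0 < i + PySem.Int.truncdiv t time_step →
      i + PySem.Int.truncdiv t time_step < (train1.length : Int) →
      i + PySem.Int.truncdiv t time_step < (train2.length : Int)
instance (taus : List Int) (train1 : List Int) (train2 : List Int) (time_step : Int) : Decidable (Pre_cross_correlation taus train1 train2 time_step) := by unfold Pre_cross_correlation; infer_instance

def pvWitness_cross_correlation : List Int × List Int × List Int × Int := ([2, -3, 2], [1, 0, 2], [4, 1, -1], 2)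

def Spec_cross_correlation (taus : List Int) (train1 : List Int) (train2 : List Int) (time_step : Int) (out : List Int) : Prop := out = cross_correlation_alt taus train1 train2 time_step
instance (taus : List Int) (train1 : List Int) (train2 : List Int) (time_step : Int) (out : List Int) : Decidable (Spec_cross_correlation taus train1 train2 time_step out) := by unfold Spec_cross_correlation; infer_instance

-- ===== CLAIM (what is proved, stated in full; the proofs are below) =====
def Claim_equal_cross_correlation : Prop := ∀ (taus : List Int) (train1 : List Int) (train2 : List Int) (time_step : Int), Dom_cross_correlation taus train1 train2 time_step → Pre_cross_correlation taus train1 train2 time_step → Spec_cross_correlation taus train1 train2 time_step (cross_correlation taus train1 train2 time_step)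

-- ===== LEMMAS AND PROOFS =====

-- filtering a unit-step range by an interval condition yields the clipped range
lemma cc_filter_pyRange (c e : Int) : ∀ (k : Nat) (a b : Int), (b - a).toNat = k →
    (PySem.List.pyRange a b 1).filter (fun x => decide (c ≤ x ∧ x < e))
      = PySem.List.pyRange (max a c) (min b e) 1 := by
  intro k
  induction k with
  | zero =>
    intro a b hk
    have hba : b ≤ a := by omega
    rw [PySem.List.pyRange_one_eq_nil hba, PySem.List.pyRange_one_eq_nil (by omega)]
    rfl
  | succ k ih =>
    intro a b hk
    have hab : a < b := by omega
    rw [PySem.List.pyRange_one_cons hab]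
    by_cases hc : c ≤ a ∧ a < e
    · rw [List.filter_cons_of_pos (by simp [hc])]
      rw [ih (a + 1) b (by omega)]
      have h1 : max (a + 1) c = a + 1 := by omega
      have h2 : max a c = a := by omega
      rw [h1, h2, PySem.List.pyRange_one_cons (by omega : a < min b e)]
    · rw [List.filter_cons_of_neg (by simp [hc])]
      rw [ih (a + 1) b (by omega)]
      rcases not_and_or.mp hc with h | h
      · have : max (a + 1) c = max a c := by omega
        rw [this]
      · rw [PySem.List.pyRange_one_eq_nil (by omega : min b e ≤ max a c), PySem.List.pyRange_one_eq_nil (by omega : min b e ≤ max (a+1) c)]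

-- A's filtered full-range sum equals B's clipped-window sum
lemma cc_inner_eq (train1 train2 : List Int) (d : Int) :
    (PySem.List.pyRange 0 (train1.length : Int) 1).foldl
      (fun acc i =>
        if 0 < i + d ∧ i + d < (train1.length : Int) then
          acc + PySem.List.pyGetD train1 i 0 * PySem.List.pyGetD train2 (i + d) 0
        else acc) 0
      = ccAltWindowSum train1 train2 d := by
  unfold ccAltWindowSum
  rw [PySem.List.foldl_ite_eq_foldl_filter]
  have hpred : ∀ x : Int, (decide (0 < x + d ∧ x + d < (train1.length : Int)))
      = (decide ((1 - d) ≤ x ∧ x < (train1.length : Int) - d)) := by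
    intro x; rw [decide_eq_decide]; omega
  have : (PySem.List.pyRange 0 (train1.length : Int) 1).filter
        (fun x => decide (0 < x + d ∧ x + d < (train1.length : Int)))
      = (PySem.List.pyRange 0 (train1.length : Int) 1).filter
        (fun x => decide ((1 - d) ≤ x ∧ x < (train1.length : Int) - d)) := by
    apply List.filter_congr; intro x _; exact hpred x
  rw [this, cc_filter_pyRange (1 - d) ((train1.length : Int) - d)
        ((train1.length : Int) - 0).toNat 0 (train1.length : Int) rfl]

-- folding "result[index] = f index" over range(m) on an m-length list is mapping f
lemma cc_foldl_set (f : Int → Int) (init : List Int) :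
    ∀ (k : Nat), k ≤ init.length →
    (PySem.List.pyRange 0 (k : Int) 1).foldl (fun r i => r.set i.toNat (f i)) init
      = (PySem.List.pyRange 0 (k : Int) 1).map f ++ init.drop k := by
  intro k
  induction k with
  | zero => intro _; simp [PySem.List.pyRange_one_eq_nil (by omega : (0:Int) ≤ 0)]
  | succ k ih =>
    intro hk
    have hsplit : PySem.List.pyRange 0 ((k + 1 : Nat) : Int) 1
        = PySem.List.pyRange 0 (k : Int) 1 ++ [(k : Int)] := by
      have : ((k + 1 : Nat) : Int) = (k : Int) + 1 := by push_cast; ring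
      rw [this, PySem.List.pyRange_one_succ_right (by omega)]
    rw [hsplit, List.foldl_append, List.map_append, ih (by omega)]
    simp only [List.foldl_cons, List.foldl_nil, List.map_cons, List.map_nil]
    have hlen : ((PySem.List.pyRange 0 (k : Int) 1).map f).length = k := by
      simp [PySem.List.length_pyRange_one]
    have hklt : k < init.length := by omega
    rw [List.drop_eq_getElem_cons hklt]
    have hnat : ((k : Int)).toNat = k := by omega
    rw [hnat, List.set_append_right _ _ (by omega : ((PySem.List.pyRange 0 (k : Int) 1).map f).length ≤ k)]
    simp
    rw [List.drop_eq_getElem_cons hklt, List.set_cons_zero]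

-- the table step: if the key is present keep, else insert its window sum
lemma cc_table_inv (train1 train2 : List Int) :
    ∀ (l : List Int) (tbl : PySem.Dict Int Int),
    (∀ j, tbl.get? j = none ∨ tbl.get? j = some (ccAltWindowSum train1 train2 j)) →
    (∀ j, (l.foldl (fun (t : PySem.Dict Int Int) d =>
        match t.get? d with
        | some _ => t
        | none => t.insert d (ccAltWindowSum train1 train2 d)) tbl).get? j = none ∨
        (l.foldl (fun (t : PySem.Dict Int Int) d =>
        match t.get? d with
        | some _ => t
        | none => t.insert d (ccAltWindowSum train1 train2 d)) tbl).get? j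
          = some (ccAltWindowSum train1 train2 j)) ∧
    (∀ d ∈ l, (l.foldl (fun (t : PySem.Dict Int Int) d =>
        match t.get? d with
        | some _ => t
        | none => t.insert d (ccAltWindowSum train1 train2 d)) tbl).get? d
          = some (ccAltWindowSum train1 train2 d)) := by
  intro l
  induction l with
  | nil => intro tbl h; exact ⟨h, by intro d hd; cases hd⟩
  | cons x l ih =>
    intro tbl h
    simp only [List.foldl_cons]
    -- the table after the head step still satisfies the invariant, and contains x
    have hstep : (∀ j, (match tbl.get? x with
          | some _ => tbl
          | none => tbl.insert x (ccAltWindowSum train1 train2 x)).get? j = none ∨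
        (match tbl.get? x with
          | some _ => tbl
          | none => tbl.insert x (ccAltWindowSum train1 train2 x)).get? j
          = some (ccAltWindowSum train1 train2 j)) ∧
        (match tbl.get? x with
          | some _ => tbl
          | none => tbl.insert x (ccAltWindowSum train1 train2 x)).get? x
          = some (ccAltWindowSum train1 train2 x) := by
      cases hx : tbl.get? x with
      | some v =>
        refine ⟨h, ?_⟩
        rcases h x with h' | h'
        · rw [hx] at h'; cases h'
        · rw [hx] at h'; exact h' ▸ hx
      | none =>
        constructor
        · intro j
          by_cases hj : j = x
          · right; rw [hj]; exact PySem.Dict.get?_insert_self tbl x _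
          · rw [PySem.Dict.get?_insert_of_ne tbl _ hj]; exact h j
        · exact PySem.Dict.get?_insert_self tbl x _
    obtain ⟨hinv', hx⟩ := hstep
    obtain ⟨hinv2, hmem2⟩ := ih _ hinv'
    refine ⟨hinv2, ?_⟩
    intro d hd
    rcases List.mem_cons.mp hd with rfl | hd'
    · -- persistence: x already mapped correctly; the fold keeps it correct or drops to none?
      rcases hinv2 d with h0 | h0
      · -- get? cannot become none: keys are never erased; show by contradiction via persistence
        exfalso
        -- prove persistence: once some, stays some
        have persist : ∀ (l' : List Int) (t : PySem.Dict Int Int) (j : Int),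
            (t.get? j).isSome →
            ((l'.foldl (fun (t : PySem.Dict Int Int) d =>
              match t.get? d with
              | some _ => t
              | none => t.insert d (ccAltWindowSum train1 train2 d)) t).get? j).isSome := by
          intro l'
          induction l' with
          | nil => intro t j hj; exact hj
          | cons y l' ihp =>
            intro t j hj
            simp only [List.foldl_cons]
            apply ihp
            cases hy : t.get? y with
            | some v => exact hj
            | none =>
              by_cases hjy : j = y
              · subst hjy; simp [PySem.Dict.get?_insert_self]
              · rw [PySem.Dict.get?_insert_of_ne t _ hjy]; exact hj
        have := persist l _ d (by rw [hx]; rfl)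
        rw [h0] at this; simp at this
      · exact h0
    · exact hmem2 d hd'

-- ===== VERDICT (by name: the statement is the Claim_ definition above) =====
theorem cross_correlation_spec : Claim_equal_cross_correlation := by
  intro taus train1 train2 time_step _ _
  unfold Spec_cross_correlation cross_correlation cross_correlation_alt
  simp only []
  -- A's side: the set-fold over range(len taus) builds the map of inner sums
  have hA : (PySem.List.pyRange 0 (taus.length : Int) 1).foldl
      (fun r index => r.set index.toNat
        ((PySem.List.pyRange 0 (train1.length : Int) 1).foldl
          (fun acc i =>
            if 0 < i + PySem.Int.truncdiv (PySem.List.pyGetD taus index 0) time_step ∧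
               i + PySem.Int.truncdiv (PySem.List.pyGetD taus index 0) time_step < (train1.length : Int) then
              acc + PySem.List.pyGetD train1 i 0 *
                PySem.List.pyGetD train2 (i + PySem.Int.truncdiv (PySem.List.pyGetD taus index 0) time_step) 0
            else acc) 0))
      (PySem.List.pyRange 0 (taus.length : Int) 1)
      = (PySem.List.pyRange 0 (taus.length : Int) 1).map
          (fun index => ccAltWindowSum train1 train2
            (PySem.Int.truncdiv (PySem.List.pyGetD taus index 0) time_step)) := by
    have := cc_foldl_set
      (fun index => ccAltWindowSum train1 train2
        (PySem.Int.truncdiv (PySem.List.pyGetD taus index 0) time_step))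
      (PySem.List.pyRange 0 (taus.length : Int) 1) taus.length
      (by simp [PySem.List.length_pyRange_one])
    simp only [List.drop_eq_nil_of_le (by simp [PySem.List.length_pyRange_one] : (PySem.List.pyRange 0 (taus.length : Int) 1).length ≤ taus.length), List.append_nil] at this
    rw [← this]
    apply PySem.List.foldl_congr_mem
    intro acc x _
    rw [cc_inner_eq]
  rw [hA]
  -- rewrite A's map over indices as a map over taus
  have hMap : (PySem.List.pyRange 0 (taus.length : Int) 1).map
      (fun index => ccAltWindowSum train1 train2
        (PySem.Int.truncdiv (PySem.List.pyGetD taus index 0) time_step))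
      = (taus.map (fun t => PySem.Int.truncdiv t time_step)).map
          (ccAltWindowSum train1 train2) := by
    have h0 : (PySem.List.pyRange 0 (taus.length : Int) 1).map
        (fun j => PySem.List.pyGetD taus j 0) = taus :=
      PySem.List.map_pyGetD_pyRange_zero taus 0
    calc (PySem.List.pyRange 0 (taus.length : Int) 1).map
          (fun index => ccAltWindowSum train1 train2
            (PySem.Int.truncdiv (PySem.List.pyGetD taus index 0) time_step))
        = ((PySem.List.pyRange 0 (taus.length : Int) 1).map
            (fun j => PySem.List.pyGetD taus j 0)).map
            (fun t => ccAltWindowSum train1 train2 (PySem.Int.truncdiv t time_step)) := by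
          rw [List.map_map]; rfl
      _ = taus.map (fun t => ccAltWindowSum train1 train2 (PySem.Int.truncdiv t time_step)) := by rw [h0]
      _ = (taus.map (fun t => PySem.Int.truncdiv t time_step)).map
            (ccAltWindowSum train1 train2) := by rw [List.map_map]; rfl
  rw [hMap]
  -- B's side: every lookup in the finished table yields the window sum
  obtain ⟨_, hmem⟩ := cc_table_inv train1 train2
    (taus.map (fun t => PySem.Int.truncdiv t time_step)) PySem.Dict.empty
    (by intro j; left; simp [PySem.Dict.get?_empty])
  apply List.map_congr_left
  intro d hd
  rw [hmem d hd]
  rfl
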